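-- pv_equiv track=rewrite | github.com/TherionAcribus/GeoApp | plugins/official/rail_fence_cipher/main.py | _rail_pattern
-- ===== SOURCE A (Python) =====
-- from typing import Any, Dict, List
--
-- def _rail_pattern(length: int, key: int, from_top: bool = True) -> List[int]:
--     if key <= 1:
--         return [0] * length
--     pattern: List[int] = []
--     row = 0 if from_top else key - 1
--     direction = 1 if from_top else -1
--     for _ in range(length):
--         pattern.append(row)
--         if row == 0:
--             direction = 1
--         elif row == key - 1:
--             direction = -1
--         row += direction
--     return pattern
-- ===== SOURCE B (Python) =====
-- def _rail_pattern(length: int, key: int, from_top: bool = True):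
--     if key <= 1:
--         return [0] * length
--     P = 2 * (key - 1)
--     def row(i):
--         c = i % P
--         r = c if c <= key - 1 else P - c
--         return r if from_top else key - 1 - r
--     return [row(i) for i in range(length)]
-- ===== Notes on version B (the rewrite author's own statement) =====
-- stated objective: idiomatic
-- what changed: Replaces the stateful row/direction zigzag simulation with a direct per-index closed-form triangular-wave formula (i mod 2*(key-1), reflected), computed in a list comprehension.
import Mathlib
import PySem

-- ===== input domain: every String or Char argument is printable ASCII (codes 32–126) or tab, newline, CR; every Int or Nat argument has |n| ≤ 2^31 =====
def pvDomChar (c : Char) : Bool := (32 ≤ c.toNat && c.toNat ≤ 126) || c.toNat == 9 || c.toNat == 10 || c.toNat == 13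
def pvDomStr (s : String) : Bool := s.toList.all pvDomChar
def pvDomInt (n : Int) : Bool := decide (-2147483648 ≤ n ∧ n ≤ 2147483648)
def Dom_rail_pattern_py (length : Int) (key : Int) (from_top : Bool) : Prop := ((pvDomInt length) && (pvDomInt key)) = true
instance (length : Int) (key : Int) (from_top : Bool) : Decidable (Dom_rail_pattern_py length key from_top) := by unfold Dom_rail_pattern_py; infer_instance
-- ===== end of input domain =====

-- B replaces A's stateful row/direction zigzag simulation with a per-index closed-form
-- triangular-wave formula (idiomatic; same O(length) cost).

-- B replaces A's stateful row/direction zigzag simulation with a per-index closed-form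
-- triangular-wave formula (idiomatic; same O(length) cost).

-- ===== PORT A =====
-- A's direction update: if row == 0: dir = 1; elif row == key-1: dir = -1
def railDirA (key : Int) (row : Int) (dir : Int) : Int :=
  if row = 0 then 1 else if row = key - 1 then -1 else dir

-- A's for-loop: append row, update direction, step row
def railLoopA (key : Int) : Nat → Int → Int → List Int
  | 0, _, _ => []
  | n+1, row, dir =>
    row :: railLoopA key n (row + railDirA key row dir) (railDirA key row dir)

def rail_pattern_py (length : Int) (key : Int) (from_top : Bool) : List Int :=
  if key ≤ 1 then PySem.List.pyRepeat [0] length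
  else railLoopA key length.toNat (if from_top then 0 else key - 1) (if from_top then 1 else -1)

-- ===== PORT B =====
-- B's row(i): triangular wave of i mod 2*(key-1), mirrored when from_top is false
def railRowB (key : Int) (from_top : Bool) (i : Int) : Int :=
  let P := 2 * (key - 1)
  let c := PySem.Int.mod i P
  let r := if c ≤ key - 1 then c else P - c
  if from_top then r else key - 1 - r

def rail_pattern_py_alt (length : Int) (key : Int) (from_top : Bool) : List Int :=
  if key ≤ 1 then PySem.List.pyRepeat [0] length
  else (PySem.List.pyRange 0 length 1).map (railRowB key from_top)

-- ===== PRECONDITION & SPEC =====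
def Spec_rail_pattern_py (length : Int) (key : Int) (from_top : Bool) (out : List Int) : Prop := out = rail_pattern_py_alt length key from_top
instance (length : Int) (key : Int) (from_top : Bool) (out : List Int) : Decidable (Spec_rail_pattern_py length key from_top out) := by unfold Spec_rail_pattern_py; infer_instance

-- ===== CLAIM (what is proved, stated in full; the proofs are below) =====
def Claim_equal_rail_pattern_py : Prop := ∀ (length : Int) (key : Int) (from_top : Bool), Dom_rail_pattern_py length key from_top → Spec_rail_pattern_py length key from_top (rail_pattern_py length key from_top)

-- ===== LEMMAS AND PROOFS =====

-- the triangular wave at step k (for key ≥ 2, period 2*(key-1) > 0)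
def wave (key : Int) (k : Nat) : Int :=
  if (k : Int) % (2 * (key - 1)) ≤ key - 1 then (k : Int) % (2 * (key - 1))
  else 2 * (key - 1) - (k : Int) % (2 * (key - 1))

lemma emod_succ (key : Int) (hk : 2 ≤ key) (k : Nat) :
    (((k + 1 : Nat)) : Int) % (2 * (key - 1)) =
      if (k : Int) % (2 * (key - 1)) + 1 = 2 * (key - 1) then 0
      else (k : Int) % (2 * (key - 1)) + 1 := by
  have hc0 : (0 : Int) ≤ (k : Int) % (2 * (key - 1)) := Int.emod_nonneg _ (by omega)
  have hcP : (k : Int) % (2 * (key - 1)) < 2 * (key - 1) := Int.emod_lt_of_pos _ (by omega)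
  push_cast
  rw [Int.add_emod]
  have h1 : (1 : Int) % (2 * (key - 1)) = 1 := Int.emod_eq_of_lt (by omega) (by omega)
  rw [h1]
  split
  · next h => rw [h, Int.emod_self]
  · next h => exact Int.emod_eq_of_lt (by omega) (by omega)

lemma railLoopA_wave (key : Int) (hk : 2 ≤ key) :
    ∀ (n k : Nat) (dir : Int),
      (1 ≤ (k : Int) % (2 * (key - 1)) → (k : Int) % (2 * (key - 1)) ≤ key - 1 → dir = 1) →
      ((key - 1 : Int) < (k : Int) % (2 * (key - 1)) → dir = -1) →
      railLoopA key n (wave key k) dir = (List.range n).map (fun j => wave key (k + j)) := by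
  intro n
  induction n with
  | zero => intro k dir _ _; simp [railLoopA]
  | succ m ih =>
    intro k dir h1 h2
    have hc0 : (0 : Int) ≤ (k : Int) % (2 * (key - 1)) := Int.emod_nonneg _ (by omega)
    have hcP : (k : Int) % (2 * (key - 1)) < 2 * (key - 1) := Int.emod_lt_of_pos _ (by omega)
    have hs := emod_succ key hk k
    -- the updated direction is +1 exactly below the bottom reflection point
    have hd : railDirA key (wave key k) dir =
        (if (k : Int) % (2 * (key - 1)) < key - 1 then 1 else -1) := by
      unfold railDirA wave
      split_ifs <;> omega
    -- stepping the row follows the wave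
    have hw : wave key k + (if (k : Int) % (2 * (key - 1)) < key - 1 then 1 else -1)
        = wave key (k + 1) := by
      unfold wave
      rw [hs]
      split_ifs <;> omega
    have h1' : 1 ≤ ((k + 1 : Nat) : Int) % (2 * (key - 1)) →
        ((k + 1 : Nat) : Int) % (2 * (key - 1)) ≤ key - 1 →
        (if (k : Int) % (2 * (key - 1)) < key - 1 then (1 : Int) else -1) = 1 := by
      rw [hs]; split_ifs <;> omega
    have h2' : (key - 1 : Int) < ((k + 1 : Nat) : Int) % (2 * (key - 1)) →
        (if (k : Int) % (2 * (key - 1)) < key - 1 then (1 : Int) else -1) = -1 := by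
      rw [hs]; split_ifs <;> omega
    rw [List.range_succ_eq_map, List.map_cons]
    show wave key k :: railLoopA key m _ _ = wave key (k + 0) :: _
    rw [hd, hw, ih (k + 1) _ h1' h2', List.map_map]
    simp only [Nat.add_zero]
    congr 1
    apply List.map_congr_left
    intro j _
    simp only [Function.comp_apply]
    congr 1
    omega

theorem rail_pattern_py_spec : Claim_equal_rail_pattern_py := by
  intro length key from_top _
  unfold Spec_rail_pattern_py rail_pattern_py rail_pattern_py_alt
  by_cases hk : key ≤ 1
  · simp [hk]
  · simp only [hk, if_false]
    have hk2 : 2 ≤ key := by omega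
    have hrange : PySem.List.pyRange 0 length 1 = (List.range length.toNat).map (fun j : Nat => ((j : Int))) := by
      rw [PySem.List.pyRange_one]
      simp
    -- B's row agrees with the wave (and its mirror) at nonnegative indices
    have hrow : ∀ j : Nat, railRowB key from_top (j : Int) =
        (if from_top then wave key j else key - 1 - wave key j) := by
      intro j
      simp only [railRowB, wave]
      rw [PySem.Int.mod_eq_emod_of_pos (by omega)]
    rw [hrange, List.map_map]
    cases from_top with
    | true =>
      have h0 : wave key 0 = 0 := by
        unfold wave
        simp only [Nat.cast_zero, Int.zero_emod]
        rw [if_pos (by omega)]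
      have := railLoopA_wave key hk2 length.toNat 0 1 (by simp) (by simp; omega)
      simp only [Nat.zero_add] at this
      rw [if_pos rfl, if_pos rfl, ← h0, this]
      apply List.map_congr_left
      intro j _
      rw [Function.comp_apply, hrow j, if_pos rfl]
    | false =>
      -- mirror: A's loop from (key-1, -1) is the pointwise mirror of the loop from (0, 1)
      have hmirror : ∀ (n : Nat) (row dir : Int),
          railLoopA key n (key - 1 - row) (-dir) =
            (railLoopA key n row dir).map (fun x => key - 1 - x) := by
        intro n
        induction n with
        | zero => intro row dir; simp [railLoopA]
        | succ m ihm =>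
          intro row dir
          simp only [railLoopA, List.map_cons]
          have hdm : railDirA key (key - 1 - row) (-dir) = -(railDirA key row dir) := by
            unfold railDirA
            split_ifs <;> omega
          rw [hdm]
          congr 1
          have : key - 1 - row + -(railDirA key row dir) = key - 1 - (row + railDirA key row dir) := by ring
          rw [this, ihm]
      have h0 : wave key 0 = 0 := by
        unfold wave
        simp only [Nat.cast_zero, Int.zero_emod]
        rw [if_pos (by omega)]
      have hwave := railLoopA_wave key hk2 length.toNat 0 1 (by simp) (by simp; omega)
      simp only [Nat.zero_add] at hwave
      have hstart : (key - 1 : Int) = key - 1 - 0 := by ring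
      have hdir : (-1 : Int) = -(1 : Int) := by ring
      rw [if_neg (by simp), if_neg (by simp), hstart, hdir, hmirror, ← h0, hwave, List.map_map]
      apply List.map_congr_left
      intro j _
      simp only [Function.comp_apply]
      rw [hrow j, if_neg (by simp)]
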